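-- pv_equiv track=rewrite | github.com/ParthShindenovus/Whipsmart_Admin_Backend | agents/langgraph_agent/agent.py | _generate_fallback_suggestions
-- ===== SOURCE A (Python) =====
-- def _generate_fallback_suggestions(assistant_message: str, user_message: str, question_type: str = None) -> list:
--     """Generate fallback suggestions when RAG-based approach fails."""
--     suggestions = []
--
--     # Generate contextual suggestions based on conversation
--     message_lower = user_message.lower()
--     assistant_lower = assistant_message.lower()
--
--     # Context-based suggestions for domain questions
--     if question_type == 'domain':
--         if any(word in message_lower for word in ['price', 'cost', 'fee', 'pricing']):
--             suggestions.extend(["Get a quote", "Tell me more about pricing", "What's included?"])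
--         elif any(word in message_lower for word in ['vehicle', 'car', 'ev', 'tesla']):
--             suggestions.extend(["Show me available vehicles", "Get a quote", "Tell me about EVs"])
--         elif any(word in message_lower for word in ['process', 'how', 'steps', 'apply']):
--             suggestions.extend(["Apply for lease", "What happens next?", "Connect with team"])
--         elif any(word in message_lower for word in ['tax', 'benefit', 'saving']):
--             suggestions.extend(["Tell me about tax benefits", "How much can I save?", "Get a quote"])
--         elif any(word in message_lower for word in ['novated', 'lease', 'leasing']):
--             suggestions.extend(["How does novated leasing work?", "Get a quote", "Apply for lease"])
--         else:
--             # Default suggestions for domain questions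
--             suggestions.extend(["Get a quote", "Connect with team", "Tell me more"])
--
--     # Context-based suggestions for other question types
--     elif any(word in assistant_lower for word in ['contact', 'team', 'speak', 'call']):
--         suggestions.extend(["Connect with team", "Yes, connect me", "Not right now"])
--     else:
--         # Default suggestions
--         suggestions.extend(["Get a quote", "Connect with team", "Tell me more"])
--
--     # Remove duplicates while preserving order
--     seen = set()
--     unique_suggestions = []
--     for suggestion in suggestions:
--         if suggestion not in seen:
--             seen.add(suggestion)
--             unique_suggestions.append(suggestion)
--
--     return unique_suggestions[:3]  # Max 3 suggestions
-- ===== SOURCE B (Python) =====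
-- _KEYWORD_RULE = [
--     ("price", 0), ("cost", 0), ("fee", 0), ("pricing", 0),
--     ("vehicle", 1), ("car", 1), ("ev", 1), ("tesla", 1),
--     ("process", 2), ("how", 2), ("steps", 2), ("apply", 2),
--     ("tax", 3), ("benefit", 3), ("saving", 3),
--     ("novated", 4), ("lease", 4), ("leasing", 4),
-- ]
--
-- _RULE_SUGGESTIONS = [
--     ["Get a quote", "Tell me more about pricing", "What's included?"],
--     ["Show me available vehicles", "Get a quote", "Tell me about EVs"],
--     ["Apply for lease", "What happens next?", "Connect with team"],
--     ["Tell me about tax benefits", "How much can I save?", "Get a quote"],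
--     ["How does novated leasing work?", "Get a quote", "Apply for lease"],
--     ["Get a quote", "Connect with team", "Tell me more"],  # domain default
-- ]
--
--
-- def _generate_fallback_suggestions(assistant_message: str, user_message: str, question_type: str = None) -> list:
--     """Fallback suggestions via a flat keyword->rule-index map: scan all keywords once,
--     keep the minimal matching rule index, and look the answer up in a table.
--     Correct because A's elif chain picks the first (= lowest-indexed) matching group,
--     and each rule's 3 suggestions are already distinct so A's dedup/[:3] tail is a no-op."""
--     if question_type == 'domain':
--         text = user_message.lower()
--         best = 5
--         for kw, i in _KEYWORD_RULE:
--             if kw in text: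
--                 best = min(best, i)
--         return list(_RULE_SUGGESTIONS[best])
--     text = assistant_message.lower()
--     if any(w in text for w in ('contact', 'team', 'speak', 'call')):
--         return ["Connect with team", "Yes, connect me", "Not right now"]
--     return ["Get a quote", "Connect with team", "Tell me more"]
-- ===== Notes on version B (the rewrite author's own statement) =====
-- stated objective: simpler
-- what changed: Replaced A's five-branch elif chain with an accumulator and a seen-set dedup/[:3] tail by a flat keyword-to-rule-index map scanned in one pass keeping the minimal matching index (no short-circuit priority chain), followed by a table lookup; the dedup pass is dropped because each rule's 3 suggestions are provably distinct.
import Mathlib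
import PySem

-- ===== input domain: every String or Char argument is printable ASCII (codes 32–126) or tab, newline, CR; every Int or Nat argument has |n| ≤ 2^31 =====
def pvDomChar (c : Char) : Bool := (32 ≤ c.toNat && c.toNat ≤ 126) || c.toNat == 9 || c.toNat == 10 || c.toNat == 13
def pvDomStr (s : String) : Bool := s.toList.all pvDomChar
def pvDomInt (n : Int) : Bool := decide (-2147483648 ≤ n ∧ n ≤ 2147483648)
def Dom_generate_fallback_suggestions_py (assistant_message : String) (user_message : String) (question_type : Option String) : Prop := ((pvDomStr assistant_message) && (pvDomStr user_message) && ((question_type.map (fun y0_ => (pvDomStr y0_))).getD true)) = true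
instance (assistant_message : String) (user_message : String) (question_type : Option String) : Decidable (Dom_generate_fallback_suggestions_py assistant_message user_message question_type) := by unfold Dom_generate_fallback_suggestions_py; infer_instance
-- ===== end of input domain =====

-- B replaces A's elif chain + accumulator + dedup/[:3] tail by a flat keyword->rule-index
-- map scanned once keeping the minimal matching index, then a table lookup (objective: simpler).

-- ===== PORT A =====
-- literal transliteration of A: build `suggestions` via the if/elif chain, then dedup with a seen-set and take 3
def generate_fallback_suggestions_py (assistant_message : String) (user_message : String) (question_type : Option String) : List String :=
  let message_lower := PySem.Str.lower user_message
  let assistant_lower := PySem.Str.lower assistant_message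
  let suggestions : List String :=
    if question_type == some "domain" then
      if (["price", "cost", "fee", "pricing"].any fun w => PySem.Str.isIn w message_lower) then
        ["Get a quote", "Tell me more about pricing", "What's included?"]
      else if (["vehicle", "car", "ev", "tesla"].any fun w => PySem.Str.isIn w message_lower) then
        ["Show me available vehicles", "Get a quote", "Tell me about EVs"]
      else if (["process", "how", "steps", "apply"].any fun w => PySem.Str.isIn w message_lower) then
        ["Apply for lease", "What happens next?", "Connect with team"]
      else if (["tax", "benefit", "saving"].any fun w => PySem.Str.isIn w message_lower) then
        ["Tell me about tax benefits", "How much can I save?", "Get a quote"]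
      else if (["novated", "lease", "leasing"].any fun w => PySem.Str.isIn w message_lower) then
        ["How does novated leasing work?", "Get a quote", "Apply for lease"]
      else
        ["Get a quote", "Connect with team", "Tell me more"]
    else if (["contact", "team", "speak", "call"].any fun w => PySem.Str.isIn w assistant_lower) then
      ["Connect with team", "Yes, connect me", "Not right now"]
    else
      ["Get a quote", "Connect with team", "Tell me more"]
  -- remove duplicates preserving order, with a seen set, then [:3]
  let st := suggestions.foldl
    (fun (st : PySem.Set String × List String) s =>
      if st.1.contains s then st else (st.1.add s, st.2 ++ [s]))
    (PySem.Set.empty, [])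
  st.2.take 3

-- ===== PORT B =====
def pvKeywordRule : List (String × Nat) :=
  [ ("price", 0), ("cost", 0), ("fee", 0), ("pricing", 0),
    ("vehicle", 1), ("car", 1), ("ev", 1), ("tesla", 1),
    ("process", 2), ("how", 2), ("steps", 2), ("apply", 2),
    ("tax", 3), ("benefit", 3), ("saving", 3),
    ("novated", 4), ("lease", 4), ("leasing", 4) ]

def pvRuleSuggestions : List (List String) :=
  [ ["Get a quote", "Tell me more about pricing", "What's included?"],
    ["Show me available vehicles", "Get a quote", "Tell me about EVs"],
    ["Apply for lease", "What happens next?", "Connect with team"],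
    ["Tell me about tax benefits", "How much can I save?", "Get a quote"],
    ["How does novated leasing work?", "Get a quote", "Apply for lease"],
    ["Get a quote", "Connect with team", "Tell me more"] ]

def generate_fallback_suggestions_py_alt (assistant_message : String) (user_message : String) (question_type : Option String) : List String :=
  if question_type == some "domain" then
    let text := PySem.Str.lower user_message
    -- the for-loop of Source B: best = min of the rule indices of all matching keywords (default 5)
    let best := pvKeywordRule.foldl
      (fun best p => if PySem.Str.isIn p.1 text then min best p.2 else best) 5
    -- _RULE_SUGGESTIONS[best]: best is always in range 0..5, so plain getD is exact here
    pvRuleSuggestions.getD best []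
  else if (["contact", "team", "speak", "call"].any fun w => PySem.Str.isIn w (PySem.Str.lower assistant_message)) then
    ["Connect with team", "Yes, connect me", "Not right now"]
  else
    ["Get a quote", "Connect with team", "Tell me more"]

-- ===== PRECONDITION & SPEC =====
def Spec_generate_fallback_suggestions_py (assistant_message : String) (user_message : String) (question_type : Option String) (out : List String) : Prop := out = generate_fallback_suggestions_py_alt assistant_message user_message question_type
instance (assistant_message : String) (user_message : String) (question_type : Option String) (out : List String) : Decidable (Spec_generate_fallback_suggestions_py assistant_message user_message question_type out) := by unfold Spec_generate_fallback_suggestions_py; infer_instance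

-- ===== CLAIM (what is proved, stated in full; the proofs are below) =====
def Claim_equal_generate_fallback_suggestions_py : Prop := ∀ (assistant_message : String) (user_message : String) (question_type : Option String), Dom_generate_fallback_suggestions_py assistant_message user_message question_type → Spec_generate_fallback_suggestions_py assistant_message user_message question_type (generate_fallback_suggestions_py assistant_message user_message question_type)

-- ===== LEMMAS AND PROOFS =====

-- ===== VERDICT (by name: the statement is the Claim_ definition above) =====
theorem generate_fallback_suggestions_py_spec : Claim_equal_generate_fallback_suggestions_py := by
  intro am um qt _
  unfold Spec_generate_fallback_suggestions_py
  by_cases hqt : (qt == some "domain") = true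
  · simp only [generate_fallback_suggestions_py, generate_fallback_suggestions_py_alt,
      pvKeywordRule, pvRuleSuggestions, hqt, if_pos]
    by_cases h0 : PySem.Chars.isIn ['p', 'r', 'i', 'c', 'e'] (PySem.Chars.lower um.toList) = true
    · simp [h0, Nat.min_def]
    · 
      by_cases h1 : PySem.Chars.isIn ['c', 'o', 's', 't'] (PySem.Chars.lower um.toList) = true
      · simp [h0, h1, Nat.min_def]
      · 
        by_cases h2 : PySem.Chars.isIn ['f', 'e', 'e'] (PySem.Chars.lower um.toList) = true
        · simp [h0, h1, h2, Nat.min_def]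
        · 
          by_cases h3 : PySem.Chars.isIn ['p', 'r', 'i', 'c', 'i', 'n', 'g'] (PySem.Chars.lower um.toList) = true
          · simp [h0, h1, h2, h3, Nat.min_def]
          · 
            by_cases h4 : PySem.Chars.isIn ['v', 'e', 'h', 'i', 'c', 'l', 'e'] (PySem.Chars.lower um.toList) = true
            · simp [h0, h1, h2, h3, h4, Nat.min_def]
            · 
              by_cases h5 : PySem.Chars.isIn ['c', 'a', 'r'] (PySem.Chars.lower um.toList) = true
              · simp [h0, h1, h2, h3, h4, h5, Nat.min_def]
              · 
                by_cases h6 : PySem.Chars.isIn ['e', 'v'] (PySem.Chars.lower um.toList) = true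
                · simp [h0, h1, h2, h3, h4, h5, h6, Nat.min_def]
                · 
                  by_cases h7 : PySem.Chars.isIn ['t', 'e', 's', 'l', 'a'] (PySem.Chars.lower um.toList) = true
                  · simp [h0, h1, h2, h3, h4, h5, h6, h7, Nat.min_def]
                  · 
                    by_cases h8 : PySem.Chars.isIn ['p', 'r', 'o', 'c', 'e', 's', 's'] (PySem.Chars.lower um.toList) = true
                    · simp [h0, h1, h2, h3, h4, h5, h6, h7, h8, Nat.min_def]
                    · 
                      by_cases h9 : PySem.Chars.isIn ['h', 'o', 'w'] (PySem.Chars.lower um.toList) = true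
                      · simp [h0, h1, h2, h3, h4, h5, h6, h7, h8, h9, Nat.min_def]
                      · 
                        by_cases h10 : PySem.Chars.isIn ['s', 't', 'e', 'p', 's'] (PySem.Chars.lower um.toList) = true
                        · simp [h0, h1, h2, h3, h4, h5, h6, h7, h8, h9, h10, Nat.min_def]
                        · 
                          by_cases h11 : PySem.Chars.isIn ['a', 'p', 'p', 'l', 'y'] (PySem.Chars.lower um.toList) = true
                          · simp [h0, h1, h2, h3, h4, h5, h6, h7, h8, h9, h10, h11, Nat.min_def]
                          · 
                            by_cases h12 : PySem.Chars.isIn ['t', 'a', 'x'] (PySem.Chars.lower um.toList) = true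
                            · simp [h0, h1, h2, h3, h4, h5, h6, h7, h8, h9, h10, h11, h12, Nat.min_def]
                            · 
                              by_cases h13 : PySem.Chars.isIn ['b', 'e', 'n', 'e', 'f', 'i', 't'] (PySem.Chars.lower um.toList) = true
                              · simp [h0, h1, h2, h3, h4, h5, h6, h7, h8, h9, h10, h11, h12, h13, Nat.min_def]
                              · 
                                by_cases h14 : PySem.Chars.isIn ['s', 'a', 'v', 'i', 'n', 'g'] (PySem.Chars.lower um.toList) = true
                                · simp [h0, h1, h2, h3, h4, h5, h6, h7, h8, h9, h10, h11, h12, h13, h14, Nat.min_def]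
                                · 
                                  by_cases h15 : PySem.Chars.isIn ['n', 'o', 'v', 'a', 't', 'e', 'd'] (PySem.Chars.lower um.toList) = true
                                  · simp [h0, h1, h2, h3, h4, h5, h6, h7, h8, h9, h10, h11, h12, h13, h14, h15, Nat.min_def]
                                  · 
                                    by_cases h16 : PySem.Chars.isIn ['l', 'e', 'a', 's', 'e'] (PySem.Chars.lower um.toList) = true
                                    · simp [h0, h1, h2, h3, h4, h5, h6, h7, h8, h9, h10, h11, h12, h13, h14, h15, h16, Nat.min_def]
                                    · 
                                      by_cases h17 : PySem.Chars.isIn ['l', 'e', 'a', 's', 'i', 'n', 'g'] (PySem.Chars.lower um.toList) = true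
                                      · simp [h0, h1, h2, h3, h4, h5, h6, h7, h8, h9, h10, h11, h12, h13, h14, h15, h16, h17, Nat.min_def]
                                      · 
                                        simp [h0, h1, h2, h3, h4, h5, h6, h7, h8, h9, h10, h11, h12, h13, h14, h15, h16, h17]
  · have hqt' : (qt == some "domain") = false := by simpa using hqt
    simp only [generate_fallback_suggestions_py, generate_fallback_suggestions_py_alt, hqt',
      Bool.false_eq_true, if_false]
    by_cases hc : (["contact", "team", "speak", "call"].any fun w => PySem.Str.isIn w (PySem.Str.lower am)) = true
    · rw [if_pos hc]; rfl
    · rw [if_neg hc]; rfl
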